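-- pv_equiv track=rewrite | github.com/python-rope/rope | rope/indenter.py | _is_line_continued
-- ===== SOURCE A (Python) =====
-- def _is_line_continued(line_contents):
--     if line_contents.endswith('\\'):
--         return True
--     current = len(line_contents) - 1
--     openings = 0
--     while current >= 0:
--         if line_contents[current] in list('([{'):
--             openings += 1
--         if line_contents[current] in list(')]}'):
--             openings -= 1
--         if openings > 0:
--             return True
--         current -= 1
--     return False
-- ===== SOURCE B (Python) =====
-- def _is_line_continued(line_contents):
--     if line_contents.endswith('\\'):
--         return True
--     depth = 0
--     for c in line_contents:
--         if c in '([{':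
--             depth += 1
--         elif c in ')]}' and depth > 0:
--             depth -= 1
--     return depth > 0
-- ===== Notes on version B (the rewrite author's own statement) =====
-- stated objective: idiomatic
-- what changed: Replaces A's backward index scan with early exit (return True as soon as some suffix has an unmatched opening) by a single forward left-to-right pass maintaining a bracket depth clamped at zero, returning depth > 0 at the end.
import Mathlib
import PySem

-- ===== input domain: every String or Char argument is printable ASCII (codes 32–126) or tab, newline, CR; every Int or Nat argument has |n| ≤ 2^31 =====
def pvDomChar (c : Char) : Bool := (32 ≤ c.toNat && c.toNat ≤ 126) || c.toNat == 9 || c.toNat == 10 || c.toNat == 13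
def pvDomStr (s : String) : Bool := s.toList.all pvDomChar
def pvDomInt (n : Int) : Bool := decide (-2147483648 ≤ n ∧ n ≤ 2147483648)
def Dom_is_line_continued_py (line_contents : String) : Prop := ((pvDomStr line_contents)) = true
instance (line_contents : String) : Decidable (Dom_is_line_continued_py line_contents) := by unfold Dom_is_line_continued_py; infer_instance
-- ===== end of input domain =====

-- B replaces A's backward early-exit scan by a single forward pass with a counter
-- clamped at zero (objective: simpler/idiomatic); return values proved equal.

-- ===== PORT A =====
-- A's while loop walks indices len-1, len-2, …, 0; ported as the obvious structural
-- recursion over the reversed character list (same state: `openings`, early return).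
def pvStepA (openings : Int) (c : Char) : Int :=
  let o1 := if c ∈ ['(', '[', '{'] then openings + 1 else openings
  if c ∈ [')', ']', '}'] then o1 - 1 else o1

def pvLoopA : List Char → Int → Bool
  | [], _ => false
  | c :: rest, openings =>
    let o2 := pvStepA openings c
    if o2 > 0 then true else pvLoopA rest o2

def is_line_continued_py (line_contents : String) : Bool :=
  if PySem.Str.endswith line_contents "\\" then true
  else pvLoopA line_contents.toList.reverse 0

-- ===== PORT B =====
def pvClampStep (depth : Int) (c : Char) : Int :=
  if c ∈ ['(', '[', '{'] then depth + 1
  else if c ∈ [')', ']', '}'] ∧ depth > 0 then depth - 1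
  else depth

def is_line_continued_py_alt (line_contents : String) : Bool :=
  if PySem.Str.endswith line_contents "\\" then true
  else decide (line_contents.toList.foldl pvClampStep 0 > 0)

-- ===== PRECONDITION & SPEC =====
def Spec_is_line_continued_py (line_contents : String) (out : Bool) : Prop := out = is_line_continued_py_alt line_contents
instance (line_contents : String) (out : Bool) : Decidable (Spec_is_line_continued_py line_contents out) := by unfold Spec_is_line_continued_py; infer_instance

-- ===== CLAIM (what is proved, stated in full; the proofs are below) =====
def Claim_equal_is_line_continued_py : Prop := ∀ (line_contents : String), Dom_is_line_continued_py line_contents → Spec_is_line_continued_py line_contents (is_line_continued_py line_contents)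

-- ===== LEMMAS AND PROOFS =====

theorem pvClamp_nonneg (l : List Char) (d : Int) (hd : 0 ≤ d) :
    0 ≤ l.foldl pvClampStep d := by
  induction l generalizing d with
  | nil => simpa using hd
  | cons c rest ih =>
    simp only [List.foldl_cons]
    apply ih
    unfold pvClampStep
    split_ifs <;> omega

theorem pv_disjoint (c : Char) (h1 : c ∈ ['(', '[', '{']) (h2 : c ∈ [')', ']', '}']) : False := by
  fin_cases h1 <;> simp_all

theorem pvStep_true (o d : Int) (c : Char) (ho : o ≤ 0) (hd : 0 ≤ d)
    (h : pvStepA o c > 0) : pvClampStep d c > -o := by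
  by_cases hop : c ∈ ['(', '[', '{'] <;> by_cases hcl : c ∈ [')', ']', '}']
  · exact (pv_disjoint c hop hcl).elim
  all_goals simp only [pvStepA, pvClampStep, hop, hcl, if_pos, if_neg, if_true, if_false,
    true_and, false_and] at h ⊢ <;> (try split_ifs at h ⊢) <;> omega

theorem pvStep_iff (o d : Int) (c : Char) (ho : o ≤ 0) (hd : 0 ≤ d)
    (h : pvStepA o c ≤ 0) : (d > -(pvStepA o c)) ↔ (pvClampStep d c > -o) := by
  by_cases hop : c ∈ ['(', '[', '{'] <;> by_cases hcl : c ∈ [')', ']', '}']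
  · exact (pv_disjoint c hop hcl).elim
  all_goals simp only [pvStepA, pvClampStep, hop, hcl, if_pos, if_neg, if_true, if_false,
    true_and, false_and] at h ⊢ <;> (try split_ifs at h ⊢) <;> omega

theorem pvLoop_main (r : List Char) (o : Int) (ho : o ≤ 0) :
    pvLoopA r o = decide (r.reverse.foldl pvClampStep 0 > -o) := by
  induction r generalizing o with
  | nil => simp [pvLoopA]; omega
  | cons c rest ih =>
    have hd := pvClamp_nonneg rest.reverse 0 le_rfl
    simp only [pvLoopA, List.reverse_cons, List.foldl_append, List.foldl_cons, List.foldl_nil]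
    by_cases h2 : pvStepA o c > 0
    · rw [if_pos h2]
      symm
      rw [decide_eq_true_iff]
      exact pvStep_true o _ c ho hd h2
    · have ho2 : pvStepA o c ≤ 0 := by omega
      rw [if_neg h2, ih _ ho2, decide_eq_decide]
      exact pvStep_iff o _ c ho hd ho2

-- ===== VERDICT (by name: the statement is the Claim_ definition above) =====
theorem is_line_continued_py_spec : Claim_equal_is_line_continued_py := by
  intro s _
  unfold Spec_is_line_continued_py is_line_continued_py is_line_continued_py_alt
  by_cases h : PySem.Str.endswith s "\\" = true
  · rw [if_pos h, if_pos h]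
  · rw [if_neg h, if_neg h]
    simpa using pvLoop_main s.toList.reverse 0 le_rfl
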